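-- pv_equiv track=rewrite | github.com/ahmedjerba/F1_Analyzer-through-goes-hamilton- | Reinforcement_learning_partie/race_state.py | get_compound_label_from_hardness
-- ===== SOURCE A (Python) =====
-- from typing import Optional
--
-- RACE_COMPOUND_TO_C = {
--     'Bahrain': {'Hard': 'C1', 'Medium': 'C2', 'Soft': 'C3'},
--     'Saudi Arabia': {'Hard': 'C2', 'Medium': 'C3', 'Soft': 'C4'},
--     'Australia': {'Hard': 'C3', 'Medium': 'C4', 'Soft': 'C5'},
--     'Japan': {'Hard': 'C1', 'Medium': 'C2', 'Soft': 'C3'},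
--     'China': {'Hard': 'C2', 'Medium': 'C3', 'Soft': 'C4'},
--     'Miami': {'Hard': 'C2', 'Medium': 'C3', 'Soft': 'C4'},
--     'Emilia-Romagna': {'Hard': 'C3', 'Medium': 'C4', 'Soft': 'C5'},
--     'Monaco': {'Hard': 'C3', 'Medium': 'C4', 'Soft': 'C5'},
--     'Canada': {'Hard': 'C3', 'Medium': 'C4', 'Soft': 'C5'},
--     'Spain': {'Hard': 'C1', 'Medium': 'C2', 'Soft': 'C3'},
--     'Austria': {'Hard': 'C3', 'Medium': 'C4', 'Soft': 'C5'},
--     'Great Britain': {'Hard': 'C1', 'Medium': 'C2', 'Soft': 'C3'},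
--     'Hungary': {'Hard': 'C3', 'Medium': 'C4', 'Soft': 'C5'},
--     'Belgium': {'Hard': 'C2', 'Medium': 'C3', 'Soft': 'C4'},
--     'Netherlands': {'Hard': 'C1', 'Medium': 'C2', 'Soft': 'C3'},
--     'Italy': {'Hard': 'C3', 'Medium': 'C4', 'Soft': 'C5'},
--     'Azerbaijan': {'Hard': 'C3', 'Medium': 'C4', 'Soft': 'C5'},
--     'Singapore': {'Hard': 'C3', 'Medium': 'C4', 'Soft': 'C5'},
--     'USA (Austin)': {'Hard': 'C2', 'Medium': 'C3', 'Soft': 'C4'},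
--     'Mexico': {'Hard': 'C3', 'Medium': 'C4', 'Soft': 'C5'},
--     'Brazil': {'Hard': 'C3', 'Medium': 'C4', 'Soft': 'C5'},
--     'Las Vegas': {'Hard': 'C3', 'Medium': 'C4', 'Soft': 'C5'},
--     'Qatar': {'Hard': 'C1', 'Medium': 'C2', 'Soft': 'C3'},
--     'Abu Dhabi': {'Hard': 'C3', 'Medium': 'C4', 'Soft': 'C5'},
-- }
--
-- RACE_NAME_TO_COMPOUND_KEY = {
--     'Imola': 'Emilia-Romagna',
--     'Baku': 'Azerbaijan',
--     'Austin': 'USA (Austin)',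
--     'Melbourne': 'Australia',
-- }
--
-- C_HARDNESS = {'C1': 1, 'C2': 2, 'C3': 3, 'C4': 4, 'C5': 5}
--
-- def normalize_race_name_for_compound(race_name: Optional[str]) -> Optional[str]:
--     if race_name is None:
--         return None
--     key = str(race_name).strip()
--     return RACE_NAME_TO_COMPOUND_KEY.get(key, key)
--
-- def get_compound_label_from_hardness(
--     race_name: str,
--     compound_hardness: int,
--     default: Optional[str] = None,
-- ) -> Optional[str]:
--     """Return Soft/Medium/Hard label from hardness (1..5) for a given GP."""
--     if race_name is None or compound_hardness is None:
--         return default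
--
--     normalized_race = normalize_race_name_for_compound(race_name)
--     race_map = RACE_COMPOUND_TO_C.get(normalized_race)
--     if race_map is None:
--         return default
--
--     target_hardness = int(compound_hardness)
--     for label, c_code in race_map.items():
--         if C_HARDNESS.get(c_code) == target_hardness:
--             return str(label).upper()
--
--     return default
-- ===== SOURCE B (Python) =====
-- from typing import Optional
--
-- RACE_NAME_TO_COMPOUND_KEY = {
--     'Imola': 'Emilia-Romagna',
--     'Baku': 'Azerbaijan',
--     'Austin': 'USA (Austin)',
--     'Melbourne': 'Australia',
-- }
--
-- # Hardness of each race's Hard compound; Medium/Soft are base+1/base+2.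
-- RACE_HARD_BASE = {
--     'Bahrain': 1, 'Saudi Arabia': 2, 'Australia': 3, 'Japan': 1, 'China': 2,
--     'Miami': 2, 'Emilia-Romagna': 3, 'Monaco': 3, 'Canada': 3, 'Spain': 1,
--     'Austria': 3, 'Great Britain': 1, 'Hungary': 3, 'Belgium': 2,
--     'Netherlands': 1, 'Italy': 3, 'Azerbaijan': 3, 'Singapore': 3,
--     'USA (Austin)': 2, 'Mexico': 3, 'Brazil': 3, 'Las Vegas': 3,
--     'Qatar': 1, 'Abu Dhabi': 3,
-- }
--
-- LABELS = ['HARD', 'MEDIUM', 'SOFT']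
--
-- def get_compound_label_from_hardness(
--     race_name: str,
--     compound_hardness: int,
--     default: Optional[str] = None,
-- ) -> Optional[str]:
--     if race_name is None or compound_hardness is None:
--         return default
--     key = str(race_name).strip()
--     key = RACE_NAME_TO_COMPOUND_KEY.get(key, key)
--     base = RACE_HARD_BASE.get(key)
--     if base is None:
--         return default
--     offset = int(compound_hardness) - base
--     if 0 <= offset <= 2:
--         return LABELS[offset]
--     return default
-- ===== Notes on version B (the rewrite author's own statement) =====
-- stated objective: simpler
-- what changed: Replaces A's per-race compound-map scan against C_HARDNESS with an arithmetic formulation: a per-race Hard-compound base integer plus an offset index into a fixed HARD/MEDIUM/SOFT label table.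
import Mathlib
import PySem

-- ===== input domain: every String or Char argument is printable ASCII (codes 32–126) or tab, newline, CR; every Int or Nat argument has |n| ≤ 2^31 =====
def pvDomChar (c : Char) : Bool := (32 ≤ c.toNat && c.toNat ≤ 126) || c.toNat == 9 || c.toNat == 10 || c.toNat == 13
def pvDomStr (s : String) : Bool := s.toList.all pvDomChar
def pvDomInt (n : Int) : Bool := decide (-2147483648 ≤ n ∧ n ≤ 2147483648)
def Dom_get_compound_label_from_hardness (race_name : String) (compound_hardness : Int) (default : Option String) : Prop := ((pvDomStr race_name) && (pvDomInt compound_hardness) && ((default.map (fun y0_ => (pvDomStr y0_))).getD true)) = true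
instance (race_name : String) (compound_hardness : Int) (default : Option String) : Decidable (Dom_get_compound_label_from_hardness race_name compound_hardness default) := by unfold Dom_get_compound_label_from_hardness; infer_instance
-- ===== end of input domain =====

-- ===== PORT A =====
-- B is a simpler arithmetic re-formulation: per-race Hard-compound base + offset into a label table,
-- replacing A's scan of the per-race compound map against C_HARDNESS. Equivalence of return values is proved on Dom.
def RACE_COMPOUND_TO_C : PySem.Dict String (PySem.Dict String String) := PySem.Dict.mk [
  ("Bahrain", PySem.Dict.mk [("Hard", "C1"), ("Medium", "C2"), ("Soft", "C3")]),
  ("Saudi Arabia", PySem.Dict.mk [("Hard", "C2"), ("Medium", "C3"), ("Soft", "C4")]),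
  ("Australia", PySem.Dict.mk [("Hard", "C3"), ("Medium", "C4"), ("Soft", "C5")]),
  ("Japan", PySem.Dict.mk [("Hard", "C1"), ("Medium", "C2"), ("Soft", "C3")]),
  ("China", PySem.Dict.mk [("Hard", "C2"), ("Medium", "C3"), ("Soft", "C4")]),
  ("Miami", PySem.Dict.mk [("Hard", "C2"), ("Medium", "C3"), ("Soft", "C4")]),
  ("Emilia-Romagna", PySem.Dict.mk [("Hard", "C3"), ("Medium", "C4"), ("Soft", "C5")]),
  ("Monaco", PySem.Dict.mk [("Hard", "C3"), ("Medium", "C4"), ("Soft", "C5")]),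
  ("Canada", PySem.Dict.mk [("Hard", "C3"), ("Medium", "C4"), ("Soft", "C5")]),
  ("Spain", PySem.Dict.mk [("Hard", "C1"), ("Medium", "C2"), ("Soft", "C3")]),
  ("Austria", PySem.Dict.mk [("Hard", "C3"), ("Medium", "C4"), ("Soft", "C5")]),
  ("Great Britain", PySem.Dict.mk [("Hard", "C1"), ("Medium", "C2"), ("Soft", "C3")]),
  ("Hungary", PySem.Dict.mk [("Hard", "C3"), ("Medium", "C4"), ("Soft", "C5")]),
  ("Belgium", PySem.Dict.mk [("Hard", "C2"), ("Medium", "C3"), ("Soft", "C4")]),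
  ("Netherlands", PySem.Dict.mk [("Hard", "C1"), ("Medium", "C2"), ("Soft", "C3")]),
  ("Italy", PySem.Dict.mk [("Hard", "C3"), ("Medium", "C4"), ("Soft", "C5")]),
  ("Azerbaijan", PySem.Dict.mk [("Hard", "C3"), ("Medium", "C4"), ("Soft", "C5")]),
  ("Singapore", PySem.Dict.mk [("Hard", "C3"), ("Medium", "C4"), ("Soft", "C5")]),
  ("USA (Austin)", PySem.Dict.mk [("Hard", "C2"), ("Medium", "C3"), ("Soft", "C4")]),
  ("Mexico", PySem.Dict.mk [("Hard", "C3"), ("Medium", "C4"), ("Soft", "C5")]),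
  ("Brazil", PySem.Dict.mk [("Hard", "C3"), ("Medium", "C4"), ("Soft", "C5")]),
  ("Las Vegas", PySem.Dict.mk [("Hard", "C3"), ("Medium", "C4"), ("Soft", "C5")]),
  ("Qatar", PySem.Dict.mk [("Hard", "C1"), ("Medium", "C2"), ("Soft", "C3")]),
  ("Abu Dhabi", PySem.Dict.mk [("Hard", "C3"), ("Medium", "C4"), ("Soft", "C5")])]

def RACE_HARD_BASE : PySem.Dict String Int := PySem.Dict.mk [
  ("Bahrain", 1),
  ("Saudi Arabia", 2),
  ("Australia", 3),
  ("Japan", 1),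
  ("China", 2),
  ("Miami", 2),
  ("Emilia-Romagna", 3),
  ("Monaco", 3),
  ("Canada", 3),
  ("Spain", 1),
  ("Austria", 3),
  ("Great Britain", 1),
  ("Hungary", 3),
  ("Belgium", 2),
  ("Netherlands", 1),
  ("Italy", 3),
  ("Azerbaijan", 3),
  ("Singapore", 3),
  ("USA (Austin)", 2),
  ("Mexico", 3),
  ("Brazil", 3),
  ("Las Vegas", 3),
  ("Qatar", 1),
  ("Abu Dhabi", 3)]

def RACE_NAME_TO_COMPOUND_KEY : PySem.Dict String String := PySem.Dict.mk [
  ("Imola", "Emilia-Romagna"), ("Baku", "Azerbaijan"), ("Austin", "USA (Austin)"), ("Melbourne", "Australia")]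

def C_HARDNESS : PySem.Dict String Int := PySem.Dict.mk [
  ("C1", 1), ("C2", 2), ("C3", 3), ("C4", 4), ("C5", 5)]

-- Python's `race_name is None` / `compound_hardness is None` guards cannot fire for String/Int arguments.
-- normalize_race_name_for_compound (race_name is a str, never None here)
def normalize_race_name_for_compound (race_name : String) : String :=
  let key := PySem.Str.strip race_name
  PySem.Dict.getD RACE_NAME_TO_COMPOUND_KEY key key

-- the `for label, c_code in race_map.items()` loop: first label whose C_HARDNESS.get(c_code) == target
def compoundLoopA : List (String × String) → Int → Option String → Option String
  | [], _, dflt => dflt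
  | (label, c_code) :: rest, target, dflt =>
    if PySem.Dict.get? C_HARDNESS c_code == some target then some (PySem.Str.upper label)
    else compoundLoopA rest target dflt

def get_compound_label_from_hardness (race_name : String) (compound_hardness : Int) (default : Option String) : Option String :=
  let normalized_race := normalize_race_name_for_compound race_name
  match PySem.Dict.get? RACE_COMPOUND_TO_C normalized_race with
  | none => default
  | some race_map =>
      let target_hardness := compound_hardness  -- int(compound_hardness)
      compoundLoopA race_map.items target_hardness default

-- ===== PORT B =====
def LABELS : List String := ["HARD", "MEDIUM", "SOFT"]

def get_compound_label_from_hardness_alt (race_name : String) (compound_hardness : Int) (default : Option String) : Option String :=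
  let key := PySem.Str.strip race_name
  let key := PySem.Dict.getD RACE_NAME_TO_COMPOUND_KEY key key
  match PySem.Dict.get? RACE_HARD_BASE key with
  | none => default
  | some base =>
      let offset := compound_hardness - base
      if 0 ≤ offset ∧ offset ≤ 2 then PySem.List.pyGet? LABELS offset else default

-- ===== PRECONDITION & SPEC =====
def Spec_get_compound_label_from_hardness (race_name : String) (compound_hardness : Int) (default : Option String) (out : Option String) : Prop := out = get_compound_label_from_hardness_alt race_name compound_hardness default
instance (race_name : String) (compound_hardness : Int) (default : Option String) (out : Option String) : Decidable (Spec_get_compound_label_from_hardness race_name compound_hardness default out) := by unfold Spec_get_compound_label_from_hardness; infer_instance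

-- ===== CLAIM (what is proved, stated in full; the proofs are below) =====
def Claim_equal_get_compound_label_from_hardness : Prop := ∀ (race_name : String) (compound_hardness : Int) (default : Option String), Dom_get_compound_label_from_hardness race_name compound_hardness default → Spec_get_compound_label_from_hardness race_name compound_hardness default (get_compound_label_from_hardness race_name compound_hardness default)

-- ===== LEMMAS AND PROOFS =====
lemma loop_base1 (h : Int) (d : Option String) :
    compoundLoopA [("Hard", "C1"), ("Medium", "C2"), ("Soft", "C3")] h d
    = if 0 ≤ h - 1 ∧ h - 1 ≤ 2 then PySem.List.pyGet? LABELS (h - 1) else d := by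
  by_cases h1 : h = 1; · subst h1; rfl
  by_cases h2 : h = 2; · subst h2; rfl
  by_cases h3 : h = 3; · subst h3; rfl
  simp only [compoundLoopA, C_HARDNESS, PySem.Dict.get?_mk_cons]
  rw [if_neg (by omega : ¬((0:Int) ≤ h - 1 ∧ h - 1 ≤ 2))]
  simp
  rw [if_neg (by omega : ¬(1:Int) = h), if_neg (by omega : ¬(2:Int) = h), if_neg (by omega : ¬(3:Int) = h)]

lemma loop_base2 (h : Int) (d : Option String) :
    compoundLoopA [("Hard", "C2"), ("Medium", "C3"), ("Soft", "C4")] h d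
    = if 0 ≤ h - 2 ∧ h - 2 ≤ 2 then PySem.List.pyGet? LABELS (h - 2) else d := by
  by_cases h1 : h = 2; · subst h1; rfl
  by_cases h2 : h = 3; · subst h2; rfl
  by_cases h3 : h = 4; · subst h3; rfl
  simp only [compoundLoopA, C_HARDNESS, PySem.Dict.get?_mk_cons]
  rw [if_neg (by omega : ¬((0:Int) ≤ h - 2 ∧ h - 2 ≤ 2))]
  simp
  rw [if_neg (by omega : ¬(2:Int) = h), if_neg (by omega : ¬(3:Int) = h), if_neg (by omega : ¬(4:Int) = h)]

lemma loop_base3 (h : Int) (d : Option String) :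
    compoundLoopA [("Hard", "C3"), ("Medium", "C4"), ("Soft", "C5")] h d
    = if 0 ≤ h - 3 ∧ h - 3 ≤ 2 then PySem.List.pyGet? LABELS (h - 3) else d := by
  by_cases h1 : h = 3; · subst h1; rfl
  by_cases h2 : h = 4; · subst h2; rfl
  by_cases h3 : h = 5; · subst h3; rfl
  simp only [compoundLoopA, C_HARDNESS, PySem.Dict.get?_mk_cons]
  rw [if_neg (by omega : ¬((0:Int) ≤ h - 3 ∧ h - 3 ≤ 2))]
  simp
  rw [if_neg (by omega : ¬(3:Int) = h), if_neg (by omega : ¬(4:Int) = h), if_neg (by omega : ¬(5:Int) = h)]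

set_option maxHeartbeats 1000000 in
lemma main_eq (k : String) (h : Int) (d : Option String) :
    (match PySem.Dict.get? RACE_COMPOUND_TO_C k with
     | none => d
     | some race_map => compoundLoopA race_map.items h d)
    = (match PySem.Dict.get? RACE_HARD_BASE k with
       | none => d
       | some base => if 0 ≤ h - base ∧ h - base ≤ 2 then PySem.List.pyGet? LABELS (h - base) else d) := by
  simp only [RACE_COMPOUND_TO_C, RACE_HARD_BASE, PySem.Dict.get?_mk_cons]
  by_cases c0 : ("Bahrain" == k) = true
  · rw [if_pos c0, if_pos c0]; exact loop_base1 h d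
  rw [if_neg c0, if_neg c0]
  by_cases c1 : ("Saudi Arabia" == k) = true
  · rw [if_pos c1, if_pos c1]; exact loop_base2 h d
  rw [if_neg c1, if_neg c1]
  by_cases c2 : ("Australia" == k) = true
  · rw [if_pos c2, if_pos c2]; exact loop_base3 h d
  rw [if_neg c2, if_neg c2]
  by_cases c3 : ("Japan" == k) = true
  · rw [if_pos c3, if_pos c3]; exact loop_base1 h d
  rw [if_neg c3, if_neg c3]
  by_cases c4 : ("China" == k) = true
  · rw [if_pos c4, if_pos c4]; exact loop_base2 h d
  rw [if_neg c4, if_neg c4]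
  by_cases c5 : ("Miami" == k) = true
  · rw [if_pos c5, if_pos c5]; exact loop_base2 h d
  rw [if_neg c5, if_neg c5]
  by_cases c6 : ("Emilia-Romagna" == k) = true
  · rw [if_pos c6, if_pos c6]; exact loop_base3 h d
  rw [if_neg c6, if_neg c6]
  by_cases c7 : ("Monaco" == k) = true
  · rw [if_pos c7, if_pos c7]; exact loop_base3 h d
  rw [if_neg c7, if_neg c7]
  by_cases c8 : ("Canada" == k) = true
  · rw [if_pos c8, if_pos c8]; exact loop_base3 h d
  rw [if_neg c8, if_neg c8]
  by_cases c9 : ("Spain" == k) = true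
  · rw [if_pos c9, if_pos c9]; exact loop_base1 h d
  rw [if_neg c9, if_neg c9]
  by_cases c10 : ("Austria" == k) = true
  · rw [if_pos c10, if_pos c10]; exact loop_base3 h d
  rw [if_neg c10, if_neg c10]
  by_cases c11 : ("Great Britain" == k) = true
  · rw [if_pos c11, if_pos c11]; exact loop_base1 h d
  rw [if_neg c11, if_neg c11]
  by_cases c12 : ("Hungary" == k) = true
  · rw [if_pos c12, if_pos c12]; exact loop_base3 h d
  rw [if_neg c12, if_neg c12]
  by_cases c13 : ("Belgium" == k) = true
  · rw [if_pos c13, if_pos c13]; exact loop_base2 h d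
  rw [if_neg c13, if_neg c13]
  by_cases c14 : ("Netherlands" == k) = true
  · rw [if_pos c14, if_pos c14]; exact loop_base1 h d
  rw [if_neg c14, if_neg c14]
  by_cases c15 : ("Italy" == k) = true
  · rw [if_pos c15, if_pos c15]; exact loop_base3 h d
  rw [if_neg c15, if_neg c15]
  by_cases c16 : ("Azerbaijan" == k) = true
  · rw [if_pos c16, if_pos c16]; exact loop_base3 h d
  rw [if_neg c16, if_neg c16]
  by_cases c17 : ("Singapore" == k) = true
  · rw [if_pos c17, if_pos c17]; exact loop_base3 h d
  rw [if_neg c17, if_neg c17]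
  by_cases c18 : ("USA (Austin)" == k) = true
  · rw [if_pos c18, if_pos c18]; exact loop_base2 h d
  rw [if_neg c18, if_neg c18]
  by_cases c19 : ("Mexico" == k) = true
  · rw [if_pos c19, if_pos c19]; exact loop_base3 h d
  rw [if_neg c19, if_neg c19]
  by_cases c20 : ("Brazil" == k) = true
  · rw [if_pos c20, if_pos c20]; exact loop_base3 h d
  rw [if_neg c20, if_neg c20]
  by_cases c21 : ("Las Vegas" == k) = true
  · rw [if_pos c21, if_pos c21]; exact loop_base3 h d
  rw [if_neg c21, if_neg c21]
  by_cases c22 : ("Qatar" == k) = true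
  · rw [if_pos c22, if_pos c22]; exact loop_base1 h d
  rw [if_neg c22, if_neg c22]
  by_cases c23 : ("Abu Dhabi" == k) = true
  · rw [if_pos c23, if_pos c23]; exact loop_base3 h d
  rw [if_neg c23, if_neg c23]
  rfl

-- ===== VERDICT (by name: the statement is the Claim_ definition above) =====
theorem get_compound_label_from_hardness_spec : Claim_equal_get_compound_label_from_hardness := by
  intro race_name compound_hardness default _
  unfold Spec_get_compound_label_from_hardness
  unfold get_compound_label_from_hardness get_compound_label_from_hardness_alt
    normalize_race_name_for_compound
  exact main_eq _ compound_hardness default
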